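-- pv_equiv track=rewrite | github.com/albertz/playground | better_exchook.py | parse_py_statement
-- ===== SOURCE A (Python) =====
-- def parse_py_statement(line):
-- 	state = 0
-- 	curtoken = ""
-- 	spaces = " \t\n"
-- 	ops = ".,;:+-*/%&!=|(){}[]^<>"
-- 	i = 0
-- 	def _escape_char(c):
-- 		if c == "n": return "\n"
-- 		elif c == "t": return "\t"
-- 		else: return c
-- 	while i < len(line):
-- 		c = line[i]
-- 		i += 1
-- 		if state == 0:
-- 			if c in spaces: pass
-- 			elif c in ops: yield ("op", c)
-- 			elif c == "#": state = 6
-- 			elif c == "\"": state = 1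
-- 			elif c == "'": state = 2
-- 			else:
-- 				curtoken = c
-- 				state = 3
-- 		elif state == 1: # string via "
-- 			if c == "\\": state = 4
-- 			elif c == "\"":
-- 				yield ("str", curtoken)
-- 				curtoken = ""
-- 				state = 0
-- 			else: curtoken += c
-- 		elif state == 2: # string via '
-- 			if c == "\\": state = 5
-- 			elif c == "'":
-- 				yield ("str", curtoken)
-- 				curtoken = ""
-- 				state = 0
-- 			else: curtoken += c
-- 		elif state == 3: # identifier
-- 			if c in spaces + ops + "#\"'":
-- 				yield ("id", curtoken)
-- 				curtoken = ""
-- 				state = 0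
-- 				i -= 1
-- 			else: curtoken += c
-- 		elif state == 4: # escape in "
-- 			curtoken += _escape_char(c)
-- 			state = 1
-- 		elif state == 5: # escape in '
-- 			curtoken += _escape_char(c)
-- 			state = 2
-- 		elif state == 6: # comment
-- 			curtoken += c
-- 	if state == 3: yield ("id", curtoken)
-- 	elif state == 6: yield ("comment", curtoken)
-- ===== SOURCE B (Python) =====
-- def parse_py_statement(line):
--     spaces = " \t\n"
--     ops = ".,;:+-*/%&!=|(){}[]^<>"
--     term = spaces + ops + "#\"'"
--     n = len(line)
--     i = 0
--     while i < n:
--         c = line[i]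
--         if c in spaces:
--             i += 1
--         elif c in ops:
--             yield ("op", c)
--             i += 1
--         elif c == "#":
--             yield ("comment", line[i + 1:])
--             return
--         elif c in "\"'":
--             q = c
--             i += 1
--             buf = []
--             while i < n:
--                 ch = line[i]
--                 if ch == "\\":
--                     if i + 1 >= n:
--                         return
--                     e = line[i + 1]
--                     buf.append({"n": "\n", "t": "\t"}.get(e, e))
--                     i += 2
--                 elif ch == q:
--                     yield ("str", "".join(buf))
--                     i += 1
--                     break
--                 else:
--                     buf.append(ch)
--                     i += 1
--             else:
--                 return
--         else:
--             j = i + 1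
--             while j < n and line[j] not in term:
--                 j += 1
--             yield ("id", line[i:j])
--             i = j
-- ===== Notes on version B (the rewrite author's own statement) =====
-- stated objective: idiomatic
-- what changed: Replaced the shared per-character state-machine switch (states 0-6, one char per iteration, with push-back) by a direct token scanner: an outer loop that dispatches on the current char into per-token consuming inner loops (string consumer handling escapes in one step, identifier span scan, comment = rest of line), eliminating the state variable and the i -= 1 push-back.
import Mathlib
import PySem

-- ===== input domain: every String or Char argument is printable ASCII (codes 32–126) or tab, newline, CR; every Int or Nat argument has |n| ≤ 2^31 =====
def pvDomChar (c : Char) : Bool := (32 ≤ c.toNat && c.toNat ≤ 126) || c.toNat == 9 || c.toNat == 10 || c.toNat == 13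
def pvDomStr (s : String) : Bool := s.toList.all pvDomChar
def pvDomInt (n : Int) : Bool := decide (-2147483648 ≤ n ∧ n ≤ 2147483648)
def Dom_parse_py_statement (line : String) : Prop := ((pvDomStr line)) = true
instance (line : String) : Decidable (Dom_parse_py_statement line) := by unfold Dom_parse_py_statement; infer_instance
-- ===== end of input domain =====

-- B rewrites A's 7-state per-character switch as a direct token scanner with per-token
-- consuming inner loops (objective: idiomatic); same O(n) cost, return value proved equal.

-- shared literal constants (exactly A's `spaces`, `ops`, and `spaces + ops + "#\"'"`)
def pvSpaces : List Char := [' ', '\t', '\n']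
def pvOps : List Char :=
  ['.', ',', ';', ':', '+', '-', '*', '/', '%', '&', '!', '=', '|',
   '(', ')', '{', '}', '[', ']', '^', '<', '>']
def pvTerm : List Char := pvSpaces ++ pvOps ++ ['#', '"', '\'']
-- A's `_escape_char` (also the dict-get in B's string consumer)
def pvEsc (c : Char) : Char := if c = 'n' then '\n' else if c = 't' then '\t' else c

-- ===== PORT A =====
-- A's while-loop: one char per step, state 0..6, curtoken accumulator; the `i -= 1`
-- push-back in state 3 is the non-consuming call `goA (c :: cs) 0 []`.
def goA : List Char → Nat → List Char → List (String × String)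
  | [], state, curtoken =>
    if state = 3 then [("id", String.ofList curtoken)]
    else if state = 6 then [("comment", String.ofList curtoken)]
    else []
  | c :: cs, state, curtoken =>
    if state = 0 then
      if c ∈ pvSpaces then goA cs 0 curtoken
      else if c ∈ pvOps then ("op", String.ofList [c]) :: goA cs 0 curtoken
      else if c = '#' then goA cs 6 curtoken
      else if c = '"' then goA cs 1 curtoken
      else if c = '\'' then goA cs 2 curtoken
      else goA cs 3 [c]
    else if state = 1 then
      if c = '\\' then goA cs 4 curtoken
      else if c = '"' then ("str", String.ofList curtoken) :: goA cs 0 []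
      else goA cs 1 (curtoken ++ [c])
    else if state = 2 then
      if c = '\\' then goA cs 5 curtoken
      else if c = '\'' then ("str", String.ofList curtoken) :: goA cs 0 []
      else goA cs 2 (curtoken ++ [c])
    else if state = 3 then
      if c ∈ pvTerm then ("id", String.ofList curtoken) :: goA (c :: cs) 0 []
      else goA cs 3 (curtoken ++ [c])
    else if state = 4 then goA cs 1 (curtoken ++ [pvEsc c])
    else if state = 5 then goA cs 2 (curtoken ++ [pvEsc c])
    else goA cs 6 (curtoken ++ [c])
termination_by cs state _ => (cs.length, if state = 3 then 1 else 0)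

def parse_py_statement (line : String) : List (String × String) := goA line.toList 0 []

-- ===== PORT B =====
-- identifier characters: everything outside `spaces + ops + "#\"'"`
def pvIdChar (d : Char) : Bool := !(d ∈ pvTerm)

-- B's inner string loop: consume until closing quote q, applying pvEsc after a backslash;
-- none = the loop `return`s (unterminated string / trailing backslash).
def consumeStr (q : Char) : List Char → List Char → Option (List Char × List Char)
  | [], _ => none
  | c :: cs, buf =>
    if c = '\\' then
      match cs with
      | [] => none
      | e :: cs' => consumeStr q cs' (buf ++ [pvEsc e])
    else if c = q then some (buf, cs)
    else consumeStr q cs (buf ++ [c])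
termination_by cs _ => cs.length

theorem consumeStr_nil (q : Char) (buf : List Char) : consumeStr q [] buf = none := by
  rw [consumeStr.eq_def]

theorem consumeStr_cons (q c : Char) (cs buf : List Char) :
    consumeStr q (c :: cs) buf =
      (if c = '\\' then
        (match cs with
         | [] => none
         | e :: cs' => consumeStr q cs' (buf ++ [pvEsc e]))
      else if c = q then some (buf, cs)
      else consumeStr q cs (buf ++ [c])) := by
  rw [consumeStr.eq_def]

theorem consumeStr_length {q : Char} : ∀ (n : Nat) (cs buf b rest : List Char),
    cs.length ≤ n → consumeStr q cs buf = some (b, rest) → rest.length < cs.length := by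
  intro n
  induction n with
  | zero =>
    intro cs buf b rest hle h
    have : cs = [] := List.eq_nil_of_length_eq_zero (Nat.le_zero.mp hle)
    subst this; simp [consumeStr_nil] at h
  | succ n ih =>
    intro cs buf b rest hle h
    match cs with
    | [] => simp [consumeStr_nil] at h
    | c :: cs =>
      rw [consumeStr_cons] at h
      split at h
      · match cs with
        | [] => simp at h
        | e :: cs' =>
          have hl : cs'.length ≤ n := by simp at hle; omega
          have := ih cs' _ _ _ hl h
          simp; omega
      · split at h
        · simp at h; simp [h.2]
        · have hl : cs.length ≤ n := by simp at hle; omega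
          have := ih cs _ _ _ hl h
          simp; omega

-- B's outer scanner: dispatch on the current char, consume a whole token per iteration.
def goB : List Char → List (String × String)
  | [] => []
  | c :: cs =>
    if c ∈ pvSpaces then goB cs
    else if c ∈ pvOps then ("op", String.ofList [c]) :: goB cs
    else if c = '#' then [("comment", String.ofList cs)]
    else if c = '"' ∨ c = '\'' then
      match h : consumeStr c cs [] with
      | none => []
      | some (buf, rest) => ("str", String.ofList buf) :: goB rest
    else
      ("id", String.ofList (c :: cs.takeWhile pvIdChar)) :: goB (cs.dropWhile pvIdChar)
termination_by cs => cs.length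
decreasing_by
  · simp
  · simp
  · have := consumeStr_length cs.length cs [] buf rest (Nat.le_refl _) h; simp; omega
  · have := List.length_dropWhile_le (l := cs) (p := pvIdChar); simp; omega

def parse_py_statement_alt (line : String) : List (String × String) := goB line.toList

-- ===== PRECONDITION & SPEC =====
def Spec_parse_py_statement (line : String) (out : List (String × String)) : Prop := out = parse_py_statement_alt line
instance (line : String) (out : List (String × String)) : Decidable (Spec_parse_py_statement line out) := by unfold Spec_parse_py_statement; infer_instance

-- ===== CLAIM (what is proved, stated in full; the proofs are below) =====
def Claim_equal_parse_py_statement : Prop := ∀ (line : String), Dom_parse_py_statement line → Spec_parse_py_statement line (parse_py_statement line)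

-- ===== LEMMAS AND PROOFS =====

-- comment state: A appends the whole rest of the line to curtoken
theorem goA_six : ∀ (cs buf : List Char), goA cs 6 buf = [("comment", String.ofList (buf ++ cs))] := by
  intro cs
  induction cs with
  | nil => intro buf; simp [goA]
  | cons c cs ih => intro buf; rw [goA]; simp [ih, List.append_assoc]

-- identifier state: A's char-by-char accumulation + push-back = B's span scan
theorem goA_three : ∀ (cs buf : List Char),
    goA cs 3 buf =
      ("id", String.ofList (buf ++ cs.takeWhile pvIdChar)) :: goA (cs.dropWhile pvIdChar) 0 [] := by
  intro cs
  induction cs with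
  | nil => intro buf; simp [goA]
  | cons c cs ih =>
    intro buf
    rw [goA]
    by_cases hc : c ∈ pvTerm
    · have hid : pvIdChar c = false := by simp [pvIdChar, hc]
      simp [hc, List.takeWhile_cons, List.dropWhile_cons, hid]
    · have hid : pvIdChar c = true := by simp [pvIdChar, hc]
      simp [hc, List.takeWhile_cons, List.dropWhile_cons, hid, ih, List.append_assoc]

-- string states 1/4 (double quote): A's state loop = B's consumeStr
theorem goA_one : ∀ (n : Nat) (cs buf : List Char), cs.length ≤ n →
    goA cs 1 buf =
      (match consumeStr '"' cs buf with
       | none => []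
       | some (b, rest) => ("str", String.ofList b) :: goA rest 0 []) := by
  intro n
  induction n with
  | zero =>
    intro cs buf hle
    have : cs = [] := List.eq_nil_of_length_eq_zero (Nat.le_zero.mp hle)
    subst this; simp [goA, consumeStr_nil]
  | succ n ih =>
    intro cs buf hle
    match cs with
    | [] => simp [goA, consumeStr_nil]
    | c :: cs =>
      rw [goA, consumeStr_cons]
      by_cases h1 : c = '\\'
      · subst h1
        match cs with
        | [] => simp [goA, consumeStr_nil]
        | e :: cs' =>
          have hl : cs'.length ≤ n := by simp at hle; omega
          simp [goA, ih cs' (buf ++ [pvEsc e]) hl]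
      · by_cases h2 : c = '"'
        · subst h2; simp
        · have hl : cs.length ≤ n := by simp at hle; omega
          simpa [h1, h2] using ih cs (buf ++ [c]) hl

-- string states 2/5 (single quote): same shape
theorem goA_two : ∀ (n : Nat) (cs buf : List Char), cs.length ≤ n →
    goA cs 2 buf =
      (match consumeStr '\'' cs buf with
       | none => []
       | some (b, rest) => ("str", String.ofList b) :: goA rest 0 []) := by
  intro n
  induction n with
  | zero =>
    intro cs buf hle
    have : cs = [] := List.eq_nil_of_length_eq_zero (Nat.le_zero.mp hle)
    subst this; simp [goA, consumeStr_nil]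
  | succ n ih =>
    intro cs buf hle
    match cs with
    | [] => simp [goA, consumeStr_nil]
    | c :: cs =>
      rw [goA, consumeStr_cons]
      by_cases h1 : c = '\\'
      · subst h1
        match cs with
        | [] => simp [goA, consumeStr_nil]
        | e :: cs' =>
          have hl : cs'.length ≤ n := by simp at hle; omega
          simp [goA, ih cs' (buf ++ [pvEsc e]) hl]
      · by_cases h2 : c = '\''
        · subst h2; simp
        · have hl : cs.length ≤ n := by simp at hle; omega
          simpa [h1, h2] using ih cs (buf ++ [c]) hl

theorem goA_eq_goB : ∀ (n : Nat) (cs : List Char), cs.length ≤ n → goA cs 0 [] = goB cs := by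
  intro n
  induction n with
  | zero =>
    intro cs hle
    have : cs = [] := List.eq_nil_of_length_eq_zero (Nat.le_zero.mp hle)
    subst this; simp [goA, goB]
  | succ n ih =>
    intro cs hle
    match cs with
    | [] => simp [goA, goB]
    | c :: cs =>
      have hlen : cs.length ≤ n := by simp at hle; omega
      rw [goA, goB]
      by_cases hs : c ∈ pvSpaces
      · simp [hs, ih cs hlen]
      · by_cases ho : c ∈ pvOps
        · simp [hs, ho, ih cs hlen]
        · by_cases hh : c = '#'
          · subst hh; simp [hs, ho, goA_six]
          · by_cases hd : c = '"'
            · subst hd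
              have hq : ('"' : Char) ∈ pvSpaces ∨ ('"' : Char) ∈ pvOps ∨ ('"' : Char) = '#' → False := by decide
              simp only [hs, ho, hh, if_false, if_neg, if_pos rfl, eq_self_iff_true, true_or, if_true]
              rw [goA_one cs.length cs [] (Nat.le_refl _)]
              match h : consumeStr '"' cs [] with
              | none => simp [h]
              | some (b, rest) =>
                have := consumeStr_length cs.length cs [] b rest (Nat.le_refl _) h
                simp [h, ih rest (by omega)]
            · by_cases hq : c = '\''
              · subst hq
                simp only [hs, ho, hh, hd, if_false, if_neg, if_pos rfl, eq_self_iff_true, or_true, if_true]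
                rw [goA_two cs.length cs [] (Nat.le_refl _)]
                match h : consumeStr '\'' cs [] with
                | none => simp [h]
                | some (b, rest) =>
                  have := consumeStr_length cs.length cs [] b rest (Nat.le_refl _) h
                  simp [h, ih rest (by omega)]
              · have := List.length_dropWhile_le (l := cs) (p := pvIdChar)
                simp [hs, ho, hh, hd, hq, goA_three, ih (cs.dropWhile pvIdChar) (by omega)]

-- ===== VERDICT (by name: the statement is the Claim_ definition above) =====
theorem parse_py_statement_spec : Claim_equal_parse_py_statement := by
  intro line _
  unfold Spec_parse_py_statement parse_py_statement parse_py_statement_alt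
  exact goA_eq_goB line.toList.length line.toList (Nat.le_refl _)
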